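-- pv_equiv track=rewrite | github.com/Fkaneko/kaggle_Google_Smartphone_Decimeter_Challenge | src/dataset/dataset.py | calc_stft_resize
-- ===== SOURCE A (Python) =====
-- from typing import Any, Dict, List, Tuple
--
-- def calc_stft_resize(
--     input_width: int = 256,
--     n_fft: int = 256,
--     base_size: int = 32,
--     search_range: int = 1000,
-- ) -> Tuple[int, int]:
--     image_height = n_fft // 2 + 1
--     image_width = input_width + 1
--
--     for _ in range(search_range):
--         if image_height % base_size == 0:
--             break
--         image_height += 1
--
--     for _ in range(search_range):
--         if image_width % base_size == 0:
--             break
--         image_width += 1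
--
--     return image_height, image_width
-- ===== SOURCE B (Python) =====
-- def calc_stft_resize(
--     input_width: int = 256,
--     n_fft: int = 256,
--     base_size: int = 32,
--     search_range: int = 1000,
-- ):
--     def next_multiple(v: int) -> int:
--         if search_range <= 0:
--             return v
--         return v + min((-v) % abs(base_size), search_range)
--
--     return next_multiple(n_fft // 2 + 1), next_multiple(input_width + 1)
-- ===== Notes on version B (the rewrite author's own statement) =====
-- stated objective: faster
-- what changed: Replaces both linear increment-until-divisible loops with a closed-form next-multiple computation: v + min((-v) % abs(base_size), search_range), guarded by search_range <= 0 (no search steps).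
import Mathlib
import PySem

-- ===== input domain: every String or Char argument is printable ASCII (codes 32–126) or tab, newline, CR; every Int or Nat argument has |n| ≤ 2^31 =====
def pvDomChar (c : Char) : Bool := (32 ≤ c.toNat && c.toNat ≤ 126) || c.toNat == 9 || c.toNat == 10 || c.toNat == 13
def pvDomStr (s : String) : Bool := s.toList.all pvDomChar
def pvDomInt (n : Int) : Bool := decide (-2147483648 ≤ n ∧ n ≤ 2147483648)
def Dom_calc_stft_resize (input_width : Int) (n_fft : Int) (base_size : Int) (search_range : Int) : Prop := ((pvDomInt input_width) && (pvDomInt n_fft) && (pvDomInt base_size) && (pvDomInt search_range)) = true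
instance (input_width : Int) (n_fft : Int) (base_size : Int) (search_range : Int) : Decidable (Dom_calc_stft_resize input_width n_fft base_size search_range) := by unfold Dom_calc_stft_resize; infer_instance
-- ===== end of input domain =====

-- B replaces A's two increment-until-divisible loops by a closed-form next-multiple
-- computation (O(1) instead of O(search_range)); return values agree on Pre_.

-- ===== PORT A =====
-- 'for _ in range(search_range): if v % base_size == 0: break; v += 1', fuel = search_range.toNat
def pvLoopA (base_size : Int) : Nat → Int → Int
  | 0, v => v
  | n + 1, v => if PySem.Int.mod v base_size = 0 then v else pvLoopA base_size n (v + 1)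

def calc_stft_resize (input_width : Int) (n_fft : Int) (base_size : Int) (search_range : Int) : Int × Int :=
  let image_height := PySem.Int.floordiv n_fft 2 + 1
  let image_width := input_width + 1
  (pvLoopA base_size search_range.toNat image_height,
   pvLoopA base_size search_range.toNat image_width)

-- ===== PORT B =====
-- next_multiple(v) = v if search_range <= 0 else v + min((-v) % abs(base_size), search_range)
def pvNextMultiple (base_size : Int) (search_range : Int) (v : Int) : Int :=
  if search_range ≤ 0 then v
  else v + min (PySem.Int.mod (-v) (base_size.natAbs : Int)) search_range

def calc_stft_resize_alt (input_width : Int) (n_fft : Int) (base_size : Int) (search_range : Int) : Int × Int :=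
  (pvNextMultiple base_size search_range (PySem.Int.floordiv n_fft 2 + 1),
   pvNextMultiple base_size search_range (input_width + 1))

-- ===== PRECONDITION & SPEC =====
-- Pre_ excludes exactly the inputs where Python raises ZeroDivisionError:
-- base_size = 0 with search_range > 0 (then both A and B evaluate '% 0').
def Pre_calc_stft_resize (input_width : Int) (n_fft : Int) (base_size : Int) (search_range : Int) : Prop :=
  base_size ≠ 0 ∨ search_range ≤ 0
instance (input_width : Int) (n_fft : Int) (base_size : Int) (search_range : Int) : Decidable (Pre_calc_stft_resize input_width n_fft base_size search_range) := by unfold Pre_calc_stft_resize; infer_instance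

def pvWitness_calc_stft_resize : Int × Int × Int × Int := (256, 256, 32, 1000)

def Spec_calc_stft_resize (input_width : Int) (n_fft : Int) (base_size : Int) (search_range : Int) (out : Int × Int) : Prop := out = calc_stft_resize_alt input_width n_fft base_size search_range
instance (input_width : Int) (n_fft : Int) (base_size : Int) (search_range : Int) (out : Int × Int) : Decidable (Spec_calc_stft_resize input_width n_fft base_size search_range out) := by unfold Spec_calc_stft_resize; infer_instance

-- ===== CLAIM (what is proved, stated in full; the proofs are below) =====
def Claim_equal_calc_stft_resize : Prop := ∀ (input_width : Int) (n_fft : Int) (base_size : Int) (search_range : Int), Dom_calc_stft_resize input_width n_fft base_size search_range → Pre_calc_stft_resize input_width n_fft base_size search_range → Spec_calc_stft_resize input_width n_fft base_size search_range (calc_stft_resize input_width n_fft base_size search_range)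

-- ===== LEMMAS AND PROOFS =====

-- Python 'v % b == 0' is divisibility by |b|, stated via emod by |b|.
theorem pvMod_zero_iff (v b : Int) :
    PySem.Int.mod v b = 0 ↔ (-v) % (b.natAbs : Int) = 0 := by
  rw [PySem.Int.mod_eq_zero_iff_dvd, PySem.Int.emod_eq_zero_iff_dvd, Int.natAbs_dvd, dvd_neg]

-- stepping v by 1 decreases the distance to the next multiple by 1
theorem pvDist_succ (v m : Int) (hm : 0 < m) (hne : (-v) % m ≠ 0) :
    (-(v + 1)) % m = (-v) % m - 1 := by
  have h0 : 0 ≤ (-v) % m := Int.emod_nonneg _ (ne_of_gt hm)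
  have h1 : (-v) % m < m := Int.emod_lt_of_pos _ hm
  have h1m : (1 : Int) % m = 1 := Int.emod_eq_of_lt (by norm_num) (by omega)
  have : (-(v + 1)) % m = ((-v) % m - 1) % m := by
    rw [show -(v + 1) = -v - 1 by ring, Int.sub_emod, h1m]
  rw [this, Int.emod_eq_of_lt (by omega) (by omega)]

-- A's loop computes v + min(distance to next multiple of |b|, fuel)
theorem pvLoopA_eq (b : Int) (hb : b ≠ 0) :
    ∀ (n : Nat) (v : Int), pvLoopA b n v = v + min ((-v) % (b.natAbs : Int)) (n : Int) := by
  have hm : (0 : Int) < (b.natAbs : Int) := by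
    have := Int.natAbs_pos.mpr hb; exact_mod_cast this
  intro n
  induction n with
  | zero =>
    intro v
    have h0 : 0 ≤ (-v) % (b.natAbs : Int) := Int.emod_nonneg _ (ne_of_gt hm)
    rw [pvLoopA]
    omega
  | succ n ih =>
    intro v
    have h0 : 0 ≤ (-v) % (b.natAbs : Int) := Int.emod_nonneg _ (ne_of_gt hm)
    rw [pvLoopA]
    by_cases h : PySem.Int.mod v b = 0
    · have hz := (pvMod_zero_iff v b).mp h
      rw [if_pos h]
      omega
    · have hnz : (-v) % (b.natAbs : Int) ≠ 0 := fun hz => h ((pvMod_zero_iff v b).mpr hz)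
      rw [if_neg h, ih (v + 1), pvDist_succ v _ hm hnz]
      omega

-- B's helper agrees with A's loop (for base_size ≠ 0 or no search steps)
theorem pvNextMultiple_eq (b sr : Int) (hpre : b ≠ 0 ∨ sr ≤ 0) (v : Int) :
    pvLoopA b sr.toNat v = pvNextMultiple b sr v := by
  by_cases hsr : sr ≤ 0
  · rw [Int.toNat_of_nonpos hsr]
    simp [pvLoopA, pvNextMultiple, hsr]
  · have hb : b ≠ 0 := hpre.resolve_right hsr
    have hm : (0 : Int) < (b.natAbs : Int) := by
      have := Int.natAbs_pos.mpr hb; exact_mod_cast this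
    rw [pvLoopA_eq b hb, pvNextMultiple, if_neg hsr,
        PySem.Int.mod_eq_emod_of_pos hm, Int.toNat_of_nonneg (by omega)]

-- ===== VERDICT (by name: the statement is the Claim_ definition above) =====
theorem calc_stft_resize_spec : Claim_equal_calc_stft_resize := by
  intro input_width n_fft base_size search_range _ hpre
  unfold Spec_calc_stft_resize
  show (pvLoopA base_size search_range.toNat (PySem.Int.floordiv n_fft 2 + 1),
        pvLoopA base_size search_range.toNat (input_width + 1)) = _
  unfold calc_stft_resize_alt
  rw [pvNextMultiple_eq base_size search_range hpre,
      pvNextMultiple_eq base_size search_range hpre]
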